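-- pv_equiv track=rewrite | github.com/THEOLEX-IO/legal_doc_processing | legal_doc_processing/press_release/structure/utils.py | find_date_line_in_intro
-- ===== SOURCE A (Python) =====
-- def find_date_line_in_intro(txt: str, len_max=35) -> str:
--     """ """
--
--     month_list = [
--         "january",
--         "febr",
--         "march",
--         "april",
--         "may",
--         "june",
--         "july",
--         "august",
--         "september",
--         "october",
--         "novembre",
--         "december",
--     ]
--     lines = [i for i in txt.splitlines() if len(i) < len_max]
--     idx_list = list()
--     for month in month_list:
--         cand_list = [i for i, j in enumerate(lines) if month.lower() in j.lower()]
--         idx_list.extend(cand_list)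
--
--     if len(idx_list) < 1:
--         return -1
--     return idx_list[0]
-- ===== SOURCE B (Python) =====
-- def find_date_line_in_intro(txt: str, len_max=35) -> str:
--     month_list = [
--         "january", "febr", "march", "april", "may", "june",
--         "july", "august", "september", "october", "novembre", "december",
--     ]
--     # one pass over the short-enough lines: record, per month, the FIRST line index containing it
--     first = {}
--     idx = 0
--     for line in txt.splitlines():
--         if len(line) < len_max:
--             low = line.lower()
--             for m in month_list:
--                 if m not in first and m in low:
--                     first[m] = idx
--             idx += 1
--     # priority scan in month_list order
--     for m in month_list:
--         if m in first:
--             return first[m]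
--     return -1
-- ===== Notes on version B (the rewrite author's own statement) =====
-- stated objective: alternative
-- what changed: Replaces A's month-outer loop that re-scans all lines per month and concatenates every match index with a single pass over the lines building a first-occurrence dict per month, followed by a priority scan over the month list.
import Mathlib
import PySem

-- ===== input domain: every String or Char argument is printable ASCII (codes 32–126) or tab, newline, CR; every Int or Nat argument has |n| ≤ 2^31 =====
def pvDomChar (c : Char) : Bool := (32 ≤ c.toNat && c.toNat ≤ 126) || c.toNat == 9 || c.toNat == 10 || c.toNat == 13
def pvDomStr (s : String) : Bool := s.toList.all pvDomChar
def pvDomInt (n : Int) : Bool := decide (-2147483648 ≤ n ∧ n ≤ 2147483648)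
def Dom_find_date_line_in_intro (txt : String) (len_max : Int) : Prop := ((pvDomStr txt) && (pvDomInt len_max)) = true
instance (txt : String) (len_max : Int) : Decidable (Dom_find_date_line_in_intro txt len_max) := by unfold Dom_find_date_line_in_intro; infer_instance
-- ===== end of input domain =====

-- B is a different decomposition: one pass over the lines building a first-index-per-month dict,
-- then a priority scan over the month list (A scans all lines once per month and concatenates all matches).

def pvMonths : List String :=
  ["january", "febr", "march", "april", "may", "june",
   "july", "august", "september", "october", "novembre", "december"]

-- ===== PORT A =====
def find_date_line_in_intro (txt : String) (len_max : Int) : Int :=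
  let month_list := pvMonths
  let lines := (PySem.Str.splitlines txt).filter (fun i => PySem.Str.len i < len_max)
  let idx_list := month_list.foldl (fun acc month =>
    acc ++ ((PySem.List.enumerate lines).filter
      (fun p => PySem.Str.isIn (PySem.Str.lower month) (PySem.Str.lower p.2))).map (fun p => p.1)) []
  if idx_list.length < 1 then -1 else idx_list.headD 0

-- ===== PORT B =====
-- inner loop of B: record the line index `n` for every month not yet in the dict that occurs in `low`
def pvRecord (d : PySem.Dict String Int) (low : String) (n : Int) : PySem.Dict String Int :=
  pvMonths.foldl (fun d m =>
    if !d.contains m && PySem.Str.isIn m low then d.insert m n else d) d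

def find_date_line_in_intro_alt (txt : String) (len_max : Int) : Int :=
  let st := (PySem.Str.splitlines txt).foldl
    (fun (st : PySem.Dict String Int × Int) line =>
      if PySem.Str.len line < len_max then
        (pvRecord st.1 (PySem.Str.lower line) st.2, st.2 + 1)
      else st)
    (PySem.Dict.empty, 0)
  (pvMonths.findSome? (fun m => st.1.get? m)).getD (-1)

-- ===== PRECONDITION & SPEC =====
def Spec_find_date_line_in_intro (txt : String) (len_max : Int) (out : Int) : Prop := out = find_date_line_in_intro_alt txt len_max
instance (txt : String) (len_max : Int) (out : Int) : Decidable (Spec_find_date_line_in_intro txt len_max out) := by unfold Spec_find_date_line_in_intro; infer_instance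

-- ===== CLAIM (what is proved, stated in full; the proofs are below) =====
def Claim_equal_find_date_line_in_intro : Prop := ∀ (txt : String) (len_max : Int), Dom_find_date_line_in_intro txt len_max → Spec_find_date_line_in_intro txt len_max (find_date_line_in_intro txt len_max)

-- ===== LEMMAS AND PROOFS =====

-- first index (counting from n) of a line in ls whose lowering contains m
def pvFirstMatch (m : String) : List String → Int → Option Int
  | [], _ => none
  | l :: ls, n => if PySem.Str.isIn m (PySem.Str.lower l) then some n else pvFirstMatch m ls (n + 1)

theorem pv_head?_flatMap {α β : Type} (l : List α) (f : α → List β) :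
    (l.flatMap f).head? = l.findSome? (fun x => (f x).head?) := by
  induction l with
  | nil => rfl
  | cons x xs ih =>
    simp only [List.flatMap_cons, List.findSome?_cons]
    cases h : f x with
    | nil => simpa using ih
    | cons b bs => simp

theorem pv_findSome?_congr {α β : Type} (l : List α) (f g : α → Option β)
    (h : ∀ a ∈ l, f a = g a) : l.findSome? f = l.findSome? g := by
  induction l with
  | nil => rfl
  | cons x xs ih =>
    simp only [List.findSome?_cons, h x (by simp)]
    cases g x with
    | none => exact ih (fun a ha => h a (by simp [ha]))
    | some b => rfl

theorem pv_foldl_skip {α β : Type} (l : List β) (p : β → Prop) [DecidablePred p]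
    (f : α → β → α) (init : α) :
    l.foldl (fun st x => if p x then f st x else st) init
      = (l.filter (fun x => decide (p x))).foldl f init := by
  induction l generalizing init with
  | nil => rfl
  | cons x xs ih =>
    by_cases h : p x <;> simp [h, ih]

theorem pv_record_get (L : List String) (d : PySem.Dict String Int) (low : String) (n : Int)
    (m : String) :
    (L.foldl (fun d m' => if !d.contains m' && PySem.Str.isIn m' low then d.insert m' n else d) d).get? m
      = if m ∈ L ∧ d.get? m = none ∧ PySem.Str.isIn m low then some n else d.get? m := by
  induction L generalizing d with
  | nil => simp
  | cons x xs ih =>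
    simp only [List.foldl_cons]
    by_cases hx : x = m
    · subst hx
      by_cases hc : d.contains x
      · have hs : d.get? x ≠ none := by
          intro h
          rw [PySem.Dict.get?_eq_none_iff_contains] at h
          simp [hc] at h
        rw [show (if !d.contains x && PySem.Str.isIn x low then d.insert x n else d) = d by
          simp [hc]]
        rw [ih]
        simp [hs]
      · have hn : d.get? x = none := by
          rw [PySem.Dict.get?_eq_none_iff_contains]; simpa using hc
        by_cases hi : PySem.Str.isIn x low
        · have hiC : PySem.Chars.isIn x.toList low.toList = true := by simpa using hi
          rw [show (if !d.contains x && PySem.Str.isIn x low then d.insert x n else d)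
              = d.insert x n by simp [hc, hiC]]
          rw [ih]
          have hg : (d.insert x n).get? x = some n := PySem.Dict.get?_insert_self d x n
          rw [if_neg (by rintro ⟨-, hnone, -⟩; rw [hg] at hnone; cases hnone), hg,
              if_pos ⟨by simp, hn, hi⟩]
        · have hiC : PySem.Chars.isIn x.toList low.toList = false := by simpa using hi
          rw [show (if !d.contains x && PySem.Str.isIn x low then d.insert x n else d) = d by
            simp [hiC]]
          rw [ih]
          rw [if_neg (by rintro ⟨-, -, h⟩; exact hi h),
              if_neg (by rintro ⟨-, -, h⟩; exact hi h)]
    · have hmx : ¬ m = x := fun h => hx h.symm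
      have hg : ∀ v, (d.insert x v).get? m = d.get? m :=
        fun v => PySem.Dict.get?_insert_of_ne d v hmx
      by_cases hcond : !d.contains x && PySem.Str.isIn x low
      · rw [if_pos hcond, ih, hg]
        simp [List.mem_cons, hmx]
      · rw [if_neg hcond, ih]
        simp [List.mem_cons, hmx]

-- invariant of B's one pass over the filtered lines
theorem pv_fold_invariant (ls : List String) (d : PySem.Dict String Int) (n : Int) (m : String)
    (hm : m ∈ pvMonths) :
    ((ls.foldl (fun (st : PySem.Dict String Int × Int) line =>
        (pvRecord st.1 (PySem.Str.lower line) st.2, st.2 + 1)) (d, n)).1).get? m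
      = ((d.get? m).or (pvFirstMatch m ls n)) := by
  induction ls generalizing d n with
  | nil => simp [pvFirstMatch]
  | cons l ls ih =>
    simp only [List.foldl_cons, pvFirstMatch]
    rw [ih]
    unfold pvRecord
    rw [pv_record_get]
    by_cases hg : d.get? m = none
    · by_cases hi : PySem.Str.isIn m (PySem.Str.lower l)
      · rw [if_pos ⟨hm, hg, hi⟩, if_pos hi, hg]
        rfl
      · rw [if_neg (by rintro ⟨-, -, h⟩; exact hi h), if_neg hi, hg]
    · rw [if_neg (by rintro ⟨-, h, -⟩; exact hg h)]
      cases h : d.get? m with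
      | none => exact absurd h hg
      | some v => simp [Option.or]

-- pvFirstMatch is the head of A's per-month candidate list
theorem pv_firstMatch_eq (m : String) (ls : List String) (n : Int) :
    pvFirstMatch m ls n
      = (((PySem.List.enumerate ls n).filter
            (fun p => PySem.Str.isIn m (PySem.Str.lower p.2))).map (fun p => p.1)).head? := by
  induction ls generalizing n with
  | nil => simp [pvFirstMatch, PySem.List.enumerate_nil]
  | cons l ls ih =>
    rw [PySem.List.enumerate_cons]
    by_cases hi : PySem.Str.isIn m (PySem.Str.lower l)
    · rw [show pvFirstMatch m (l :: ls) n = some n by rw [pvFirstMatch, if_pos hi]]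
      rw [List.filter_cons, if_pos (by simpa using hi)]
      simp
    · rw [show pvFirstMatch m (l :: ls) n = pvFirstMatch m ls (n + 1) by
        rw [pvFirstMatch, if_neg hi]]
      rw [List.filter_cons, if_neg (by simpa using hi)]
      exact ih (n + 1)

theorem pv_months_lower : ∀ m ∈ pvMonths, PySem.Str.lower m = m := by decide

theorem pv_equiv (txt : String) (len_max : Int) :
    find_date_line_in_intro txt len_max = find_date_line_in_intro_alt txt len_max := by
  simp only [find_date_line_in_intro, find_date_line_in_intro_alt]
  rw [pv_foldl_skip (PySem.Str.splitlines txt) (fun line => PySem.Str.len line < len_max)]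
  set ls := (PySem.Str.splitlines txt).filter (fun i => decide (PySem.Str.len i < len_max)) with hls
  rw [PySem.List.foldl_append_eq_flatMap]
  set g := fun month => ((PySem.List.enumerate ls).filter
      (fun p => PySem.Str.isIn (PySem.Str.lower month) (PySem.Str.lower p.2))).map
      (fun p : Int × String => p.1) with hg
  have hA : (if (([] : List Int) ++ pvMonths.flatMap g).length < 1 then (-1 : Int)
      else (([] : List Int) ++ pvMonths.flatMap g).headD 0)
      = ((pvMonths.flatMap g).head?).getD (-1) := by
    cases h : pvMonths.flatMap g with
    | nil => simp
    | cons a l =>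
      rw [List.nil_append, if_neg (by simp)]
      simp
  rw [hA, pv_head?_flatMap]
  have hB : ∀ m ∈ pvMonths,
      ((ls.foldl (fun (st : PySem.Dict String Int × Int) line =>
          (pvRecord st.1 (PySem.Str.lower line) st.2, st.2 + 1))
        ((PySem.Dict.empty : PySem.Dict String Int), 0)).1).get? m
        = pvFirstMatch m ls 0 := by
    intro m hm
    rw [pv_fold_invariant ls _ 0 m hm]
    simp [Option.or]
  refine congrArg (fun o => Option.getD o (-1)) ?_
  refine pv_findSome?_congr _ _ _ ?_
  intro m hm
  rw [hB m hm, pv_firstMatch_eq, hg]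
  simp only [pv_months_lower m hm]

-- ===== VERDICT (by name: the statement is the Claim_ definition above) =====
theorem find_date_line_in_intro_spec : Claim_equal_find_date_line_in_intro := by
  intro txt len_max _
  unfold Spec_find_date_line_in_intro
  exact pv_equiv txt len_max
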